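-- pv_equiv track=rewrite | github.com/aats0123/su_python_fundamentals | E01_intro_finctions_debugging/p08_multiply_evens_by_odds.py | sum_odd_digits
-- ===== SOURCE A (Python) =====
-- def sum_odd_digits(num):
--     sum1 = 0
--     sum2 = 0
--     counter = 0
--     while num:
--         digit = num % 10
--         num = num // 10
--         counter += 1
--         if counter % 2:
--             sum1 += digit
--         else:
--             sum2 += digit
--     if not counter % 2:
--         return sum2
--     else:
--         return sum1
-- ===== SOURCE B (Python) =====
-- def sum_odd_digits(num):
--     digits = []
--     while num:
--         digits.append(num % 10)
--         num //= 10
--     total = 0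
--     take = True
--     for d in reversed(digits):
--         if take:
--             total += d
--         take = not take
--     return total
-- ===== Notes on version B (the rewrite author's own statement) =====
-- stated objective: alternative
-- what changed: B collects all digits least-significant-first in one extraction loop, then sums every other digit from the most significant with a toggling flag over the reversed list, replacing A's two running sums, counter, and final parity branch.
import Mathlib
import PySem

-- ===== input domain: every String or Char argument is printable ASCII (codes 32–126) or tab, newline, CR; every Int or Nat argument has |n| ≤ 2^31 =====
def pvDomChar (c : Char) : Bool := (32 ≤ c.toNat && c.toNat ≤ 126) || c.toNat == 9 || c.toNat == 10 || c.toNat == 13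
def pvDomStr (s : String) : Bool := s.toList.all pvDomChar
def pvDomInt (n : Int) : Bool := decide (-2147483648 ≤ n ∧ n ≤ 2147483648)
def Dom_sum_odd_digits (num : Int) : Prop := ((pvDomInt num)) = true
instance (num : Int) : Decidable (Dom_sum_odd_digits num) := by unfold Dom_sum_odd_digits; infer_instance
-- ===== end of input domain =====

-- B collects digits then sums every other one from the most significant; equal to A wherever the ports are defined (for num < 0 both Pythons diverge; both ports stop and agree there too).

-- ===== PORT A =====
-- Python's `while num:` loops forever for num < 0; the port's `n ≤ 0` guard
-- only makes the recursion total and agrees with Python on every num ≥ 0.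
def sumOddAux (n s1 s2 c : Int) : Int :=
  if h : n ≤ 0 then
    (if PySem.Int.mod c 2 = 0 then s2 else s1)
  else
    let digit := PySem.Int.mod n 10
    let n' := PySem.Int.floordiv n 10
    if PySem.Int.mod (c + 1) 2 ≠ 0 then
      sumOddAux n' (s1 + digit) s2 (c + 1)
    else
      sumOddAux n' s1 (s2 + digit) (c + 1)
termination_by n.toNat
decreasing_by
  all_goals
    have h10 : PySem.Int.floordiv n 10 = n / 10 := PySem.Int.floordiv_eq_ediv_of_pos (by omega)
    simp only [h10]; omega

def sum_odd_digits (num : Int) : Int := sumOddAux num 0 0 0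

-- ===== PORT B =====
-- digit-extraction loop: digits.append(num % 10); num //= 10  (same guard note as for A)
def digitsLoop (n : Int) (acc : List Int) : List Int :=
  if h : n ≤ 0 then acc
  else digitsLoop (PySem.Int.floordiv n 10) (acc ++ [PySem.Int.mod n 10])
termination_by n.toNat
decreasing_by
  have h10 : PySem.Int.floordiv n 10 = n / 10 := PySem.Int.floordiv_eq_ediv_of_pos (by omega)
  simp only [h10]; omega

-- `for d in reversed(digits): if take: total += d; take = not take`
def takeLoop (l : List Int) (take : Bool) (total : Int) : Int :=
  match l with
  | [] => total
  | d :: tl => takeLoop tl (!take) (if take then total + d else total)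

def sum_odd_digits_alt (num : Int) : Int :=
  let digits := digitsLoop num []
  takeLoop digits.reverse true 0

-- ===== PRECONDITION & SPEC =====
def Spec_sum_odd_digits (num : Int) (out : Int) : Prop := out = sum_odd_digits_alt num
instance (num : Int) (out : Int) : Decidable (Spec_sum_odd_digits num out) := by unfold Spec_sum_odd_digits; infer_instance

-- ===== CLAIM (what is proved, stated in full; the proofs are below) =====
def Claim_equal_sum_odd_digits : Prop := ∀ (num : Int), Dom_sum_odd_digits num → Spec_sum_odd_digits num (sum_odd_digits num)

-- ===== LEMMAS AND PROOFS =====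

-- LSB-first digit list (proof-side view of digitsLoop)
def dig (n : Int) : List Int :=
  if h : n ≤ 0 then []
  else PySem.Int.mod n 10 :: dig (PySem.Int.floordiv n 10)
termination_by n.toNat
decreasing_by
  have h10 : PySem.Int.floordiv n 10 = n / 10 := PySem.Int.floordiv_eq_ediv_of_pos (by omega)
  simp only [h10]; omega

theorem digitsLoop_eq_dig (n : Int) (acc : List Int) : digitsLoop n acc = acc ++ dig n := by
  fun_induction digitsLoop n acc with
  | case1 n acc hle => simp [dig, hle]
  | case2 n acc hgt ih => rw [ih]; conv_rhs => rw [dig]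
                          simp [hgt]

-- every-other sum with a toggle flag (proof-side view of takeLoop)
def eo (l : List Int) (t : Bool) : Int :=
  match l with
  | [] => 0
  | d :: tl => (if t then d else 0) + eo tl (!t)

theorem takeLoop_eq (l : List Int) (t : Bool) (s : Int) : takeLoop l t s = s + eo l t := by
  induction l generalizing t s with
  | nil => simp [takeLoop, eo]
  | cons d tl ih => simp [takeLoop, eo, ih]; split <;> ring

theorem eo_append (l1 l2 : List Int) (t : Bool) :
    eo (l1 ++ l2) t = eo l1 t + eo l2 (if l1.length % 2 = 0 then t else !t) := by
  induction l1 generalizing t with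
  | nil => simp [eo]
  | cons d tl ih =>
    simp only [List.cons_append, eo, ih, List.length_cons]
    have : (tl.length + 1) % 2 = 0 ↔ ¬ tl.length % 2 = 0 := by omega
    by_cases hp : tl.length % 2 = 0 <;> simp [hp, this] <;> ring

theorem mod2 (c : Int) : PySem.Int.mod c 2 = c % 2 :=
  PySem.Int.mod_eq_emod_of_pos (by omega)

theorem sumOddAux_eq (n s1 s2 c : Int) :
    sumOddAux n s1 s2 c =
      (if (c + (dig n).length) % 2 = 0 then s2 else s1) + eo (dig n).reverse true := by
  fun_induction sumOddAux n s1 s2 c with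
  | case1 n s1 s2 c h hm =>
    rw [dig]
    have hc : c % 2 = 0 := by rw [mod2] at hm; exact hm
    simp [h, eo, hc]
  | case2 n s1 s2 c h hm =>
    rw [dig]
    have hc : ¬ c % 2 = 0 := by rw [mod2] at hm; exact hm
    simp [h, eo, hc]
  | case3 n s1 s2 c h dd nn hc ih =>
    simp only [dd, nn] at *
    rw [ih]
    conv_rhs => rw [dig]
    simp only [h, dite_false, List.length_cons, List.reverse_cons]
    rw [eo_append]
    set d := PySem.Int.mod n 10
    set L' := (dig (PySem.Int.floordiv n 10)).length with hL
    simp only [List.length_reverse, ← hL, mod2] at *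
    have hiff : (c + 1 + L') % 2 = 0 ↔ (c + (L' + 1)) % 2 = 0 := by omega
    have hcc : ¬ (c + 1) % 2 = 0 := by simpa [mod2] using hc
    by_cases hp : (c + 1 + L') % 2 = 0
    · have hL'p : ¬ L' % 2 = 0 := by omega
      simp [hp, hL'p, hiff.mp hp, eo]
    · have hL'p : L' % 2 = 0 := by omega
      have h2 : ¬ (c + (L' + 1)) % 2 = 0 := fun hx => hp (hiff.mpr hx)
      simp [hp, hL'p, h2, eo]; ring
  | case4 n s1 s2 c h dd nn hc ih =>
    simp only [dd, nn] at *
    rw [ih]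
    conv_rhs => rw [dig]
    simp only [h, dite_false, List.length_cons, List.reverse_cons]
    rw [eo_append]
    set d := PySem.Int.mod n 10
    set L' := (dig (PySem.Int.floordiv n 10)).length with hL
    simp only [List.length_reverse, ← hL, mod2] at *
    have hiff : (c + 1 + L') % 2 = 0 ↔ (c + (L' + 1)) % 2 = 0 := by omega
    have hcc : (c + 1) % 2 = 0 := by
      by_contra hx; exact hc (by simpa [mod2] using hx)
    by_cases hp : (c + 1 + L') % 2 = 0
    · have hL'p : L' % 2 = 0 := by omega
      simp [hp, hL'p, hiff.mp hp, eo]; ring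
    · have hL'p : ¬ L' % 2 = 0 := by omega
      have h2 : ¬ (c + (L' + 1)) % 2 = 0 := fun hx => hp (hiff.mpr hx)
      simp [hp, hL'p, h2, eo]

-- ===== VERDICT (by name: the statement is the Claim_ definition above) =====
theorem sum_odd_digits_spec : Claim_equal_sum_odd_digits := by
  intro num _
  unfold Spec_sum_odd_digits sum_odd_digits sum_odd_digits_alt
  rw [digitsLoop_eq_dig, List.nil_append, takeLoop_eq,
      sumOddAux_eq num 0 0 0]
  simp
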